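-- pv_equiv track=rewrite | github.com/johanngan/fermi_hubbard | ed.py | add_fermions
-- ===== SOURCE A (Python) =====
-- def add_fermions(nsites, configurations, latest_added, n_to_add):
--     """
--     Recursively adds extra fermions one-by-one to form all possible occupations
--     with a given number of total fermions and number of sites.
--
--     Inputs:
--         nsites = number of sites
--         configurations = list of configurations, each of which is a list where
--             each site represents the occupation (1) or absence (0) of a fermion
--         latest_added = list of the largest occupied site index for each
--             configuration (for internal use)
--         n_to_add = number of extra fermions to add to existing configurations
--     Outputs:
--         augmented_configurations = list of configurations with more fermions
--     """
--     if n_to_add == 0: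
--         return [[occ for occ in cfg] for cfg in configurations] # Deep copy
--
--     augmented_configurations = []
--     augmented_latest_added = []
--     for cfg, latest in zip(configurations, latest_added):
--         # Add a fermion in each possible spot
--         for i in range(latest+1, nsites):
--             augmented_configurations.append(list(cfg))
--             augmented_configurations[-1][i] = 1
--             augmented_latest_added.append(i)
--     return add_fermions(nsites, augmented_configurations,
--         augmented_latest_added, n_to_add - 1)
-- ===== SOURCE B (Python) =====
-- def add_fermions(nsites, configurations, latest_added, n_to_add):
--     if n_to_add == 0:
--         return [list(cfg) for cfg in configurations]
--     out = []
--     for cfg, latest in zip(configurations, latest_added):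
--         _emit(nsites, cfg, latest + 1, n_to_add, [], out)
--     return out
--
-- def _emit(nsites, cfg, start, k, chosen, out):
--     # Emit every way to place k fermions at increasing positions in [start, nsites).
--     if k == 0:
--         new = list(cfg)
--         for i in chosen:
--             new[i] = 1
--         out.append(new)
--         return
--     for i in range(start, nsites - k + 1):
--         _emit(nsites, cfg, i + 1, k - 1, chosen + [i], out)
-- ===== Notes on version B (the rewrite author's own statement) =====
-- stated objective: faster
-- what changed: Instead of A's level-by-level breadth-first expansion that materialises and copies every intermediate partial configuration list, B does a depth-first backtracking enumeration of the increasing position tuples per input configuration (pruned to ranges that can still be completed), emitting each finished configuration once.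
import Mathlib
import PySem

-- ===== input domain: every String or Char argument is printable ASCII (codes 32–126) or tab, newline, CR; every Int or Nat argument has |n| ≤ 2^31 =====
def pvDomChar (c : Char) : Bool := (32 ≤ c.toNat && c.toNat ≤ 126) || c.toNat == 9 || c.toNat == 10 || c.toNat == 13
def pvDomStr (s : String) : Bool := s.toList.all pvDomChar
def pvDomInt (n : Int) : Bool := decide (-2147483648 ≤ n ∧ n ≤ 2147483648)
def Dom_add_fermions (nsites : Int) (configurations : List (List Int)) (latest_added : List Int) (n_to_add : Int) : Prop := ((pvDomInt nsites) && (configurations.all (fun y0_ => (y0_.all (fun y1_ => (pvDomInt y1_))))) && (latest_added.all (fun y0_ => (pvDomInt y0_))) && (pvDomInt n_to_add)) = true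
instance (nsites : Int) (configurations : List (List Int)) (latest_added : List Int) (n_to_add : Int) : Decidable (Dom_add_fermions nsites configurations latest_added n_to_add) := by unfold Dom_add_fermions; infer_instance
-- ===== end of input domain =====

-- B replaces A's breadth-first level-by-level expansion (which materialises every
-- intermediate partial-configuration list) by a per-configuration depth-first
-- backtracking enumeration of increasing position tuples, emitting each output once.

-- Shared model of the Python list assignment `lst[i] = 1` (on a fresh copy):
-- exact wherever Python's assignment succeeds (-len ≤ i < len); inputs on which
-- Python raises IndexError are excluded by Pre_add_fermions.
def pySet1 (l : List Int) (i : Int) : List Int :=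
  if 0 ≤ i then l.set i.toNat 1 else l.set (l.length + i).toNat 1

-- ===== PORT A =====
def add_fermions (nsites : Int) (configurations : List (List Int)) (latest_added : List Int) (n_to_add : Int) : List (List Int) :=
  if n_to_add = 0 then
    configurations.map (fun cfg => cfg.map (fun occ => occ))   -- deep copy
  else if n_to_add < 0 then
    []   -- Python recurses forever here (never returns); totality guard, outside Pre_
  else
    -- the two parallel `append` loops over zip(configurations, latest_added)
    let step := (configurations.zip latest_added).foldl
      (fun (acc : List (List Int) × List Int) p =>
        (PySem.List.pyRange (p.2 + 1) nsites 1).foldl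
          (fun acc2 i => (acc2.1 ++ [pySet1 p.1 i], acc2.2 ++ [i])) acc)
      ([], [])
    add_fermions nsites step.1 step.2 (n_to_add - 1)
termination_by n_to_add.toNat
decreasing_by omega

-- ===== PORT B =====
-- helper `_emit` of Source B: place k fermions at increasing positions in [start, nsites)
def emitB (nsites : Int) (cfg : List Int) (start : Int) (k : Int) (chosen : List Int) : List (List Int) :=
  if k = 0 then
    [chosen.foldl (fun nw i => pySet1 nw i) cfg]
  else if k < 0 then
    []   -- Python B recurses forever for negative k (outside Pre_); totality guard
  else
    (PySem.List.pyRange start (nsites - k + 1) 1).foldl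
      (fun out i => out ++ emitB nsites cfg (i + 1) (k - 1) (chosen ++ [i])) []
termination_by k.toNat
decreasing_by omega

def add_fermions_alt (nsites : Int) (configurations : List (List Int)) (latest_added : List Int) (n_to_add : Int) : List (List Int) :=
  if n_to_add = 0 then
    configurations.map (fun cfg => cfg)
  else
    (configurations.zip latest_added).foldl
      (fun out p => out ++ emitB nsites p.1 (p.2 + 1) n_to_add []) []

-- ===== PRECONDITION & SPEC =====
-- Pre_ = exactly the inputs on which Python A returns: it excludes n_to_add < 0
-- (A recurses forever) and, when fermions are actually placed (n_to_add ≥ 1),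
-- configurations whose placement range [latest+1, nsites) reaches an index outside
-- the list's valid (wraparound-included) index range, where A raises IndexError.
def Pre_add_fermions (nsites : Int) (configurations : List (List Int)) (latest_added : List Int) (n_to_add : Int) : Prop :=
  0 ≤ n_to_add ∧ (1 ≤ n_to_add → ∀ p ∈ configurations.zip latest_added,
    nsites ≤ p.2 + 1 ∨ (nsites ≤ (p.1.length : Int) ∧ -(p.1.length : Int) ≤ p.2 + 1))

instance (nsites : Int) (configurations : List (List Int)) (latest_added : List Int) (n_to_add : Int) : Decidable (Pre_add_fermions nsites configurations latest_added n_to_add) := by unfold Pre_add_fermions; infer_instance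

def pvWitness_add_fermions : Int × List (List Int) × List Int × Int := (4, [[1, 0, 0, 0]], [0], 2)

def Spec_add_fermions (nsites : Int) (configurations : List (List Int)) (latest_added : List Int) (n_to_add : Int) (out : List (List Int)) : Prop := out = add_fermions_alt nsites configurations latest_added n_to_add
instance (nsites : Int) (configurations : List (List Int)) (latest_added : List Int) (n_to_add : Int) (out : List (List Int)) : Decidable (Spec_add_fermions nsites configurations latest_added n_to_add out) := by unfold Spec_add_fermions; infer_instance

-- ===== CLAIM (what is proved, stated in full; the proofs are below) =====
def Claim_equal_add_fermions : Prop := ∀ (nsites : Int) (configurations : List (List Int)) (latest_added : List Int) (n_to_add : Int), Dom_add_fermions nsites configurations latest_added n_to_add → Pre_add_fermions nsites configurations latest_added n_to_add → Spec_add_fermions nsites configurations latest_added n_to_add (add_fermions nsites configurations latest_added n_to_add)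

-- ===== LEMMAS AND PROOFS =====

-- the children of one (cfg, latest) pair in A's one-level expansion
def childL (nsites : Int) (p : List Int × Int) : List (List Int × Int) :=
  (PySem.List.pyRange (p.2 + 1) nsites 1).map (fun i => (pySet1 p.1 i, i))

theorem inner_fold (c : List Int) (l : List Int) (acc : List (List Int) × List Int) :
    l.foldl (fun acc2 i => (acc2.1 ++ [pySet1 c i], acc2.2 ++ [i])) acc
      = (acc.1 ++ l.map (fun i => pySet1 c i), acc.2 ++ l) := by
  induction l generalizing acc with
  | nil => simp
  | cons x xs ih => simp [List.foldl_cons, ih]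

theorem step_fold (nsites : Int) (P : List (List Int × Int)) (acc : List (List Int) × List Int) :
    P.foldl
      (fun (acc : List (List Int) × List Int) p =>
        (PySem.List.pyRange (p.2 + 1) nsites 1).foldl
          (fun acc2 i => (acc2.1 ++ [pySet1 p.1 i], acc2.2 ++ [i])) acc) acc
      = (acc.1 ++ (P.flatMap (childL nsites)).map Prod.fst,
         acc.2 ++ (P.flatMap (childL nsites)).map Prod.snd) := by
  induction P generalizing acc with
  | nil => simp
  | cons p ps ih =>
    rw [List.foldl_cons, inner_fold, ih]
    simp [childL, List.map_map, List.append_assoc, Function.comp_def]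

-- emitB produces nothing when the remaining range cannot be completed
theorem emitB_nil (nsites : Int) (cfg : List Int) (start k : Int) (chosen : List Int)
    (hk : 1 ≤ k) (h : nsites - k + 1 ≤ start) :
    emitB nsites cfg start k chosen = [] := by
  rw [emitB]
  rw [if_neg (by omega), if_neg (by omega), PySem.List.pyRange_one_eq_nil h]
  simp

-- the `chosen` accumulator can be applied to cfg up front
theorem emitB_shift (n : Nat) : ∀ (nsites : Int) (cfg : List Int) (start k : Int)
    (c1 c2 : List Int), k.toNat ≤ n →
    emitB nsites cfg start k (c1 ++ c2)
      = emitB nsites (c1.foldl (fun nw i => pySet1 nw i) cfg) start k c2 := by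
  induction n with
  | zero =>
    intro nsites cfg start k c1 c2 hn
    rcases eq_or_lt_of_le (by omega : k ≤ 0) with h0 | hneg
    · subst h0
      rw [emitB, emitB]
      simp [List.foldl_append]
    · have h0 : ¬(k = 0) := by omega
      rw [emitB, emitB, if_neg h0, if_pos hneg, if_neg h0, if_pos hneg]
  | succ n ih =>
    intro nsites cfg start k c1 c2 hn
    by_cases h0 : k = 0
    · subst h0
      rw [emitB, emitB]
      simp [List.foldl_append]
    · by_cases hneg : k < 0
      · rw [emitB, emitB, if_neg h0, if_pos (by omega : k < 0), if_neg h0, if_pos (by omega : k < 0)]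
      · rw [emitB, emitB, if_neg h0, if_neg h0, if_neg hneg, if_neg hneg]
        have hfun : (fun (out : List (List Int)) i =>
              out ++ emitB nsites cfg (i + 1) (k - 1) ((c1 ++ c2) ++ [i]))
            = (fun (out : List (List Int)) i =>
              out ++ emitB nsites (c1.foldl (fun nw i => pySet1 nw i) cfg) (i + 1) (k - 1) (c2 ++ [i])) := by
          funext out i
          rw [List.append_assoc, ih nsites cfg (i + 1) (k - 1) c1 (c2 ++ [i]) (by omega)]
        rw [hfun]

theorem emitB_shift_one (nsites : Int) (cfg : List Int) (i k : Int) :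
    emitB nsites cfg (i + 1) k [i] = emitB nsites (pySet1 cfg i) (i + 1) k [] := by
  have := emitB_shift k.toNat nsites cfg (i + 1) k [i] [] (le_refl _)
  simpa using this

-- one unfolding of emitB (k ≥ 1) in flatMap form
theorem emitB_unfold (nsites : Int) (cfg : List Int) (start k : Int) (hk : 1 ≤ k) :
    emitB nsites cfg start k []
      = (PySem.List.pyRange start (nsites - k + 1) 1).flatMap
          (fun i => emitB nsites (pySet1 cfg i) (i + 1) (k - 1) []) := by
  rw [emitB, if_neg (by omega), if_neg (by omega)]
  have hfun : (fun (out : List (List Int)) i =>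
        out ++ emitB nsites cfg (i + 1) (k - 1) ([] ++ [i]))
      = (fun (out : List (List Int)) i =>
        out ++ emitB nsites (pySet1 cfg i) (i + 1) (k - 1) []) := by
    funext out i
    rw [List.nil_append, emitB_shift_one]
  rw [hfun, PySem.List.foldl_append_eq_flatMap]
  simp

-- A iterates i over the full [start, nsites) while B prunes to [start, nsites-k+1);
-- the pruned tail contributes nothing.
theorem emitB_widen (nsites : Int) (cfg : List Int) (start k : Int) (hk : 1 ≤ k) :
    (PySem.List.pyRange start nsites 1).flatMap
        (fun i => emitB nsites (pySet1 cfg i) (i + 1) (k - 1) [])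
      = emitB nsites cfg start k [] := by
  rw [emitB_unfold nsites cfg start k hk]
  rcases eq_or_lt_of_le hk with h1 | h2
  · rw [← h1]
    norm_num
  · by_cases hs : start ≤ nsites - k + 1
    · rw [PySem.List.pyRange_one_append start (nsites - k + 1) nsites hs (by omega),
        List.flatMap_append]
      have : (PySem.List.pyRange (nsites - k + 1) nsites 1).flatMap
          (fun i => emitB nsites (pySet1 cfg i) (i + 1) (k - 1) []) = [] := by
        rw [List.flatMap_eq_nil_iff]
        intro i hi
        rw [PySem.List.mem_pyRange_one] at hi
        exact emitB_nil _ _ _ _ _ (by omega) (by omega)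
      rw [this, List.append_nil]
    · have hL : (PySem.List.pyRange start nsites 1).flatMap
          (fun i => emitB nsites (pySet1 cfg i) (i + 1) (k - 1) []) = [] := by
        rw [List.flatMap_eq_nil_iff]
        intro i hi
        rw [PySem.List.mem_pyRange_one] at hi
        exact emitB_nil _ _ _ _ _ (by omega) (by omega)
      have hR : (PySem.List.pyRange start (nsites - k + 1) 1).flatMap
          (fun i => emitB nsites (pySet1 cfg i) (i + 1) (k - 1) []) = [] := by
        rw [PySem.List.pyRange_one_eq_nil (by omega)]
        simp
      rw [hL, hR]

-- main lemma: for k = m+1 ≥ 1, A equals the flattened per-pair enumeration of B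
theorem main_lemma (m : Nat) : ∀ (nsites : Int) (configs : List (List Int)) (latests : List Int),
    add_fermions nsites configs latests ((m : Int) + 1)
      = (configs.zip latests).flatMap (fun p => emitB nsites p.1 (p.2 + 1) ((m : Int) + 1) []) := by
  induction m with
  | zero =>
    intro nsites configs latests
    rw [add_fermions, if_neg (by omega), if_neg (by omega)]
    simp only [step_fold, List.nil_append]
    rw [add_fermions]
    norm_num
    rw [List.map_flatMap]
    apply List.flatMap_congr
    intro p _
    rw [emitB_unfold nsites p.1 (p.2 + 1) 1 (le_refl _)]
    norm_num [childL, List.map_map, List.flatMap_def]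
    have hemit : (fun i => emitB nsites (pySet1 p.1 i) (i + 1) 0 []) = fun i => [pySet1 p.1 i] := by
      funext i
      rw [emitB, if_pos rfl]
      simp
    rw [hemit, ← List.flatMap_def, ← List.map_eq_flatMap]
    simp [Function.comp_def]
  | succ m ih =>
    intro nsites configs latests
    rw [add_fermions, if_neg (by push_cast; omega), if_neg (by push_cast; omega)]
    simp only [step_fold, List.nil_append]
    have hzip : (((configs.zip latests).flatMap (childL nsites)).map Prod.fst).zip
        (((configs.zip latests).flatMap (childL nsites)).map Prod.snd)
        = (configs.zip latests).flatMap (childL nsites) := by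
      rw [List.zip_map']
      simp
    have hk : ((m + 1 : Nat) : Int) + 1 - 1 = (m : Int) + 1 := by push_cast; omega
    rw [hk, ih nsites _ _, hzip, List.flatMap_assoc]
    apply List.flatMap_congr
    intro p _
    have hcast : ((m + 1 : Nat) : Int) + 1 = ((m : Int) + 1) + 1 := by push_cast; ring
    rw [hcast]
    rw [← emitB_widen nsites p.1 (p.2 + 1) ((m : Int) + 1 + 1) (by omega)]
    have : (m : Int) + 1 + 1 - 1 = (m : Int) + 1 := by ring
    rw [this, childL, List.flatMap_map]

-- ===== VERDICT (by name: the statement is the Claim_ definition above) =====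
theorem add_fermions_spec : Claim_equal_add_fermions := by
  unfold Claim_equal_add_fermions
  intro nsites configurations latest_added n_to_add _ hpre
  unfold Spec_add_fermions
  by_cases h0 : n_to_add = 0
  · subst h0
    rw [add_fermions, if_pos rfl, add_fermions_alt, if_pos rfl]
    simp
  · have hpos : 1 ≤ n_to_add := by
      rcases hpre with ⟨h1, _⟩
      omega
    obtain ⟨m, hm⟩ : ∃ m : Nat, n_to_add = (m : Int) + 1 :=
      ⟨(n_to_add - 1).toNat, by omega⟩
    subst hm
    rw [main_lemma m nsites configurations latest_added, add_fermions_alt,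
      if_neg (by omega), PySem.List.foldl_append_eq_flatMap]
    simp
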